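-- pv_equiv track=rewrite | github.com/wdkalmeida/desenvolve-python-basico | Testes Python/teste python 6.5.2.py | pares_unicos
-- ===== SOURCE A (Python) =====
-- def pares_unicos(numeros, soma_objetivo):
--     """
--     Encontra todos os pares únicos de números cuja soma seja igual ao valor objetivo.
--     :param numeros: Lista de números inteiros.
--     :param soma_objetivo: Valor objetivo da soma.
--     :return: Lista de tuplas com os pares únicos.
--     """
--     vistos = set()
--     pares = set()
--
--     for numero in numeros:
--         complemento = soma_objetivo - numero
--         if complemento in vistos:
--             # Adiciona o par na forma ordenada para evitar duplicatas
--             pares.add(tuple(sorted((numero, complemento))))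
--         vistos.add(numero)
--
--     return list(pares)
-- ===== SOURCE B (Python) =====
-- def pares_unicos(numeros, soma_objetivo):
--     """
--     Encontra todos os pares unicos de numeros cuja soma seja igual ao valor objetivo.
--     Varredura ingenua de todos os pares de indices i < j (sem conjunto 'vistos').
--     """
--     pares = set()
--     n = len(numeros)
--     for j in range(n):
--         for i in range(j):
--             if numeros[i] + numeros[j] == soma_objetivo:
--                 pares.add(tuple(sorted((numeros[i], numeros[j]))))
--     return list(pares)
-- ===== Notes on version B (the rewrite author's own statement) =====
-- stated objective: alternative
-- what changed: Replaces the single-pass complement-tracking scan (maintaining a 'vistos' set and testing whether each element's complement was seen) with a brute-force double loop over all index pairs i < j that tests numeros[i] + numeros[j] == soma_objetivo directly and adds the sorted pair; no seen-set and no complement arithmetic in the scan.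
import Mathlib
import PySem

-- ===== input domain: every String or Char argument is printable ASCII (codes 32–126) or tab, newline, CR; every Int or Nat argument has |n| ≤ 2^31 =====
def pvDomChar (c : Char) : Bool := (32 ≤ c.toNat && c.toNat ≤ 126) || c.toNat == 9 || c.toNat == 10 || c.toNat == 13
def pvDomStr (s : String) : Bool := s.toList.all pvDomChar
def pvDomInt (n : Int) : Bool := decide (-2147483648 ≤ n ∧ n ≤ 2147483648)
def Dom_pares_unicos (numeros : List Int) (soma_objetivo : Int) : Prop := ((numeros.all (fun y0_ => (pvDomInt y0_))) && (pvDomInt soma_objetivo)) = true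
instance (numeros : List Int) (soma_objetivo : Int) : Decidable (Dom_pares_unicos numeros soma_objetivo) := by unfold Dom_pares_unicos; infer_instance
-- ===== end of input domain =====

-- B replaces A's single-pass complement/seen-set scan by a brute-force double loop over all index pairs i < j — a different algorithm of the same result, not faster.


-- ===== PORT A =====
-- tuple(sorted((a, b))) for a two-element tuple (used by both Pythons verbatim)
def pvSortedPair (a b : Int) : Int × Int :=
  let s := PySem.List.sorted [a, b] (fun x => x) false
  (PySem.List.pyGetD s 0 0, PySem.List.pyGetD s 1 0)

-- list(pares) is ported as the set's element list (the Python result is compared as a set)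
def pares_unicos (numeros : List Int) (soma_objetivo : Int) : List (Int × Int) :=
  (numeros.foldl
    (fun (st : PySem.Set Int × PySem.Set (Int × Int)) numero =>
      let complemento := soma_objetivo - numero
      let pares :=
        if PySem.Set.contains st.1 complemento then
          PySem.Set.add st.2 (pvSortedPair numero complemento)
        else st.2
      (PySem.Set.add st.1 numero, pares))
    (PySem.Set.empty, PySem.Set.empty)).2

-- ===== PORT B =====
-- list(pares) is ported as the set's element list (the Python result is compared as a set)
def pares_unicos_alt (numeros : List Int) (soma_objetivo : Int) : List (Int × Int) :=
  let n : Int := (numeros.length : Int)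
  (PySem.List.pyRange 0 n 1).foldl
    (fun (pares : PySem.Set (Int × Int)) j =>
      (PySem.List.pyRange 0 j 1).foldl
        (fun pares i =>
          if PySem.List.pyGetD numeros i 0 + PySem.List.pyGetD numeros j 0 = soma_objetivo then
            PySem.Set.add pares (pvSortedPair (PySem.List.pyGetD numeros i 0) (PySem.List.pyGetD numeros j 0))
          else pares)
        pares)
    PySem.Set.empty

-- ===== PRECONDITION & SPEC =====
def Spec_pares_unicos (numeros : List Int) (soma_objetivo : Int) (out : List (Int × Int)) : Prop := out = pares_unicos_alt numeros soma_objetivo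
instance (numeros : List Int) (soma_objetivo : Int) (out : List (Int × Int)) : Decidable (Spec_pares_unicos numeros soma_objetivo out) := by unfold Spec_pares_unicos; infer_instance

-- ===== CLAIM (what is proved, stated in full; the proofs are below) =====
def Claim_equal_pares_unicos : Prop := ∀ (numeros : List Int) (soma_objetivo : Int), Dom_pares_unicos numeros soma_objetivo → Spec_pares_unicos numeros soma_objetivo (pares_unicos numeros soma_objetivo)

-- ===== LEMMAS AND PROOFS =====

-- the candidate pairs A emits while scanning xs after the prefix 'pre' has been seen
def pvCands (soma : Int) : List Int → List Int → List (Int × Int)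
  | _pre, [] => []
  | pre, x :: xs =>
      (if (soma - x) ∈ pre then [pvSortedPair x (soma - x)] else []) ++ pvCands soma (pre ++ [x]) xs

theorem pvSortedPair_comm (a b : Int) : pvSortedPair a b = pvSortedPair b a := by
  have hs : PySem.List.sorted [a, b] (fun x => x) false = PySem.List.sorted [b, a] (fun x => x) false :=
    PySem.List.sorted_eq_sorted_of_perm [a, b] [b, a] (fun x => x) (fun _ _ h => h) (List.Perm.swap b a [])
  simp [pvSortedPair, hs]

theorem pvAddIdem {α : Type} [BEq α] [LawfulBEq α] (s : PySem.Set α) (p : α) :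
    PySem.Set.add (PySem.Set.add s p) p = PySem.Set.add s p := by
  by_cases h : p ∈ s <;> simp [PySem.Set.add, PySem.Set.contains, h]

-- a fold that conditionally adds a single (fixed) element is an 'if ∃ …' add
theorem pvInnerFold {α : Type} [BEq α] [LawfulBEq α] (l : List Int) (c : Int → Prop)
    [DecidablePred c] (f : Int → α) (p : α) (hf : ∀ i ∈ l, c i → f i = p) (s : PySem.Set α) :
    l.foldl (fun s i => if c i then PySem.Set.add s (f i) else s) s
      = if ∃ i ∈ l, c i then PySem.Set.add s p else s := by
  induction l generalizing s with
  | nil => simp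
  | cons a l ih =>
      have ih' := ih (fun i hi => hf i (List.mem_cons_of_mem a hi))
      by_cases ha : c a
      · rw [List.foldl_cons, if_pos ha, hf a (List.mem_cons_self) ha, ih']
        by_cases hex : ∃ i ∈ l, c i
        · rw [if_pos hex, if_pos ⟨a, List.mem_cons_self, ha⟩, pvAddIdem]
        · rw [if_neg hex, if_pos ⟨a, List.mem_cons_self, ha⟩]
      · rw [List.foldl_cons, if_neg ha, ih']
        by_cases hex : ∃ i ∈ l, c i
        · rw [if_pos hex, if_pos (by rcases hex with ⟨i, hi, hc⟩; exact ⟨i, List.mem_cons_of_mem a hi, hc⟩)]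
        · rw [if_neg hex, if_neg (by rintro ⟨i, hi, hc⟩; rcases List.mem_cons.mp hi with rfl | hi; exact ha hc; exact hex ⟨i, hi, hc⟩)]

-- A's fold is Set.add over the candidate stream (same as in the seeded layout)
theorem pvFoldA (soma : Int) (xs pre : List Int) (p : PySem.Set (Int × Int)) :
    (xs.foldl
      (fun (st : PySem.Set Int × PySem.Set (Int × Int)) numero =>
        let complemento := soma - numero
        let pares :=
          if PySem.Set.contains st.1 complemento then
            PySem.Set.add st.2 (pvSortedPair numero complemento)
          else st.2
        (PySem.Set.add st.1 numero, pares))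
      (PySem.Set.ofList pre, p)).2
    = (pvCands soma pre xs).foldl PySem.Set.add p := by
  induction xs generalizing pre p with
  | nil => simp [pvCands]
  | cons x xs ih =>
      have hadd : PySem.Set.add (PySem.Set.ofList pre) x = PySem.Set.ofList (pre ++ [x]) := by
        simp [PySem.Set.ofList_eq_foldl]
      have hmem : PySem.Set.contains (PySem.Set.ofList pre) (soma - x) = decide ((soma - x) ∈ pre) := by
        simp [PySem.Set.contains]
      rw [List.foldl_cons]
      simp only [hmem, hadd, decide_eq_true_eq]
      by_cases h : (soma - x) ∈ pre
      · rw [if_pos h, ih (pre ++ [x]) (PySem.Set.add p (pvSortedPair x (soma - x)))]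
        simp [pvCands, h]
      · rw [if_neg h, ih (pre ++ [x]) p]
        simp [pvCands, h]

theorem pvCandsApp (soma x : Int) (ys pre : List Int) :
    pvCands soma pre (ys ++ [x])
      = pvCands soma pre ys ++ (if (soma - x) ∈ pre ++ ys then [pvSortedPair x (soma - x)] else []) := by
  induction ys generalizing pre with
  | nil => simp [pvCands]
  | cons y ys ih =>
      simp only [List.cons_append, pvCands, ih (pre ++ [y]), List.append_assoc, List.cons_append,
        List.nil_append]

-- B's double loop over xs produces A's candidate stream folded with Set.add
theorem pvFoldB (soma : Int) (xs : List Int) (s : PySem.Set (Int × Int)) :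
    (PySem.List.pyRange 0 (xs.length : Int) 1).foldl
      (fun (pares : PySem.Set (Int × Int)) j =>
        (PySem.List.pyRange 0 j 1).foldl
          (fun pares i =>
            if PySem.List.pyGetD xs i 0 + PySem.List.pyGetD xs j 0 = soma then
              PySem.Set.add pares (pvSortedPair (PySem.List.pyGetD xs i 0) (PySem.List.pyGetD xs j 0))
            else pares)
          pares)
      s
    = (pvCands soma [] xs).foldl PySem.Set.add s := by
  induction xs using List.reverseRecOn generalizing s with
  | nil => simp [pvCands, PySem.List.pyRange_zero]
  | append_singleton ys x ih =>
      have hlen : ((ys ++ [x]).length : Int) = (ys.length : Int) + 1 := by simp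
      rw [hlen, PySem.List.pyRange_one_succ_right (by positivity)]
      rw [List.foldl_append]
      -- the first |ys| outer iterations only touch indices < |ys|, where xs and ys agree
      have hget : ∀ i : Int, 0 ≤ i → i < (ys.length : Int) →
          PySem.List.pyGetD (ys ++ [x]) i 0 = PySem.List.pyGetD ys i 0 := by
        intro i h0 hl
        rw [PySem.List.pyGetD_of_nonneg _ _ h0, PySem.List.pyGetD_of_nonneg _ _ h0]
        rw [List.getD_append]
        omega
      have houter :
          (PySem.List.pyRange 0 (ys.length : Int) 1).foldl
            (fun (pares : PySem.Set (Int × Int)) j =>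
              (PySem.List.pyRange 0 j 1).foldl
                (fun pares i =>
                  if PySem.List.pyGetD (ys ++ [x]) i 0 + PySem.List.pyGetD (ys ++ [x]) j 0 = soma then
                    PySem.Set.add pares (pvSortedPair (PySem.List.pyGetD (ys ++ [x]) i 0) (PySem.List.pyGetD (ys ++ [x]) j 0))
                  else pares)
                pares)
            s
          = (PySem.List.pyRange 0 (ys.length : Int) 1).foldl
              (fun (pares : PySem.Set (Int × Int)) j =>
                (PySem.List.pyRange 0 j 1).foldl
                  (fun pares i =>
                    if PySem.List.pyGetD ys i 0 + PySem.List.pyGetD ys j 0 = soma then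
                      PySem.Set.add pares (pvSortedPair (PySem.List.pyGetD ys i 0) (PySem.List.pyGetD ys j 0))
                    else pares)
                  pares)
              s := by
        apply PySem.List.foldl_congr_mem
        intro pares j hj
        rcases (PySem.List.mem_pyRange_one).mp hj with ⟨hj0, hjl⟩
        apply PySem.List.foldl_congr_mem
        intro pares' i hi
        rcases (PySem.List.mem_pyRange_one).mp hi with ⟨hi0, hij⟩
        rw [hget i hi0 (lt_trans hij hjl), hget j hj0 hjl]
      rw [houter, ih]
      -- the last outer iteration, j = |ys|: the inner loop scans ys for soma - x
      have hx : PySem.List.pyGetD (ys ++ [x]) (ys.length : Int) 0 = x := by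
        rw [PySem.List.pyGetD_of_nonneg _ _ (by positivity)]
        simp
      have hinner := pvInnerFold (α := Int × Int) (PySem.List.pyRange 0 (ys.length : Int) 1)
        (fun i => PySem.List.pyGetD (ys ++ [x]) i 0 + PySem.List.pyGetD (ys ++ [x]) (ys.length : Int) 0 = soma)
        (fun i => pvSortedPair (PySem.List.pyGetD (ys ++ [x]) i 0) (PySem.List.pyGetD (ys ++ [x]) (ys.length : Int) 0))
        (pvSortedPair (soma - x) x)
        (by
          intro i hi hc
          rcases (PySem.List.mem_pyRange_one).mp hi with ⟨hi0, hil⟩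
          simp only at hc ⊢
          rw [hget i hi0 hil, hx] at hc ⊢
          have : PySem.List.pyGetD ys i 0 = soma - x := by omega
          rw [this])
        ((pvCands soma [] ys).foldl PySem.Set.add s)
      simp only [] at hinner
      simp only [List.foldl_cons, List.foldl_nil]
      rw [hinner, pvCandsApp]
      have hexists : (∃ i ∈ PySem.List.pyRange 0 (ys.length : Int) 1,
          PySem.List.pyGetD (ys ++ [x]) i 0 + PySem.List.pyGetD (ys ++ [x]) (ys.length : Int) 0 = soma)
          ↔ (soma - x) ∈ ([] : List Int) ++ ys := by
        simp only [List.nil_append]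
        constructor
        · rintro ⟨i, hi, hc⟩
          rcases (PySem.List.mem_pyRange_one).mp hi with ⟨hi0, hil⟩
          rw [hget i hi0 hil, hx] at hc
          have : PySem.List.pyGetD ys i 0 = soma - x := by omega
          rw [← this]
          rw [PySem.List.pyGetD_of_nonneg _ _ hi0]
          have hb : i.toNat < ys.length := by omega
          rw [List.getD_eq_getElem ys 0 hb]
          exact List.getElem_mem hb
        · intro hmem
          rcases List.mem_iff_getElem.mp hmem with ⟨k, hk, hke⟩
          refine ⟨(k : Int), (PySem.List.mem_pyRange_one).mpr ⟨by positivity, by exact_mod_cast hk⟩, ?_⟩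
          rw [hget (k : Int) (by positivity) (by exact_mod_cast hk), hx]
          have : PySem.List.pyGetD ys (k : Int) 0 = soma - x := by
            rw [PySem.List.pyGetD_of_nonneg _ _ (by positivity)]
            simp only [Int.toNat_natCast]
            rw [List.getD_eq_getElem ys 0 hk]
            exact hke
          rw [this]
          omega
      by_cases hm : (soma - x) ∈ ([] : List Int) ++ ys
      · rw [if_pos (hexists.mpr hm), if_pos (by simpa using hm)]
        simp [pvSortedPair_comm]
      · rw [if_neg (fun h => hm (hexists.mp h)), if_neg (by simpa using hm)]
        simp

-- ===== VERDICT (by name: the statement is the Claim_ definition above) =====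
theorem pares_unicos_spec : Claim_equal_pares_unicos := by
  intro numeros soma _
  have hA : pares_unicos numeros soma = List.foldl PySem.Set.add PySem.Set.empty (pvCands soma [] numeros) :=
    pvFoldA soma numeros [] PySem.Set.empty
  have hB := pvFoldB soma numeros PySem.Set.empty
  show pares_unicos numeros soma = pares_unicos_alt numeros soma
  rw [hA, ← hB]
  rfl
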